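-- pv_equiv track=rewrite | github.com/PLSE-Lab/Python-MLAPI-expl | python_sources/default-example.py | get_interval
-- ===== SOURCE A (Python) =====
-- def get_interval(bins, value):
--   if value <= bins[0]:
--     return 0
--   if value > bins[-1]:
--     return len(bins)
--
--   for i in range(1, len(bins)):
--     if bins[i - 1] < value and value <= bins[i]:
--       return i
-- ===== SOURCE B (Python) =====
-- def get_interval(bins, value):
--     lo, hi = 0, len(bins)
--     while lo < hi:
--         mid = (lo + hi) // 2
--         if bins[mid] < value:
--             lo = mid + 1
--         else:
--             hi = mid
--     return lo
-- ===== Notes on version B (the rewrite author's own statement) =====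
-- stated objective: faster
-- what changed: Replaced A's left-to-right linear scan for the first bin >= value by a lower-bound binary search on the sorted bins.
-- outside the precondition, e.g. on get_interval([0, 5, 0, 5], 3): A returns 1, B returns 3
import Mathlib
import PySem

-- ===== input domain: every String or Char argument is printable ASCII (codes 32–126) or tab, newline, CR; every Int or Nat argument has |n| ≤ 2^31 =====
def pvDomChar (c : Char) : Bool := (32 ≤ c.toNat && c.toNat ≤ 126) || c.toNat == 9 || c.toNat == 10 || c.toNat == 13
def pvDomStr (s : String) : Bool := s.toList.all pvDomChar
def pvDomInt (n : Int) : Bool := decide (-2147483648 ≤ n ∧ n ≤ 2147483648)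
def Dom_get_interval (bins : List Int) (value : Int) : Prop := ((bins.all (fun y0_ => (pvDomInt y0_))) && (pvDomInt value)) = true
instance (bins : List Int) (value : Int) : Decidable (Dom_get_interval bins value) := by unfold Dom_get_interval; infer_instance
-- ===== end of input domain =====

-- B replaces A's linear first-crossing scan by a lower-bound binary search (faster on sorted bins).

-- ===== PORT A =====
-- the 'for i in range(1, len(bins))' loop; falling off the loop returns Python None,
-- which is unreachable under Pre_ (nonempty bins); we give 0 there.
def get_interval_scan (bins : List Int) (value : Int) : List Int → Int
  | [] => 0
  | i :: rest =>
    if (PySem.List.pyGet? bins (i - 1)).getD 0 < value ∧ value ≤ (PySem.List.pyGet? bins i).getD 0 then i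
    else get_interval_scan bins value rest

def get_interval (bins : List Int) (value : Int) : Int :=
  -- bins[0] / bins[-1]: IndexError on empty bins is excluded by Pre_; .getD 0 is unreachable there
  if value ≤ (PySem.List.pyGet? bins 0).getD 0 then 0
  else if value > (PySem.List.pyGet? bins (-1)).getD 0 then (bins.length : Int)
  else get_interval_scan bins value (PySem.List.pyRange 1 (bins.length : Int) 1)

-- ===== PORT B =====
-- the 'while lo < hi' loop; fuel bounds the iteration count (hi - lo shrinks each step)
def get_interval_bs (bins : List Int) (value : Int) : Nat → Int → Int → Int
  | 0, lo, _ => lo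
  | fuel + 1, lo, hi =>
    if lo < hi then
      let mid := PySem.Int.floordiv (lo + hi) 2
      if (PySem.List.pyGet? bins mid).getD 0 < value then get_interval_bs bins value fuel (mid + 1) hi
      else get_interval_bs bins value fuel lo mid
    else lo

def get_interval_alt (bins : List Int) (value : Int) : Int :=
  get_interval_bs bins value (bins.length + 1) 0 (bins.length : Int)

-- ===== PRECONDITION & SPEC =====
-- Pre_ excludes empty bins (A raises IndexError there) and bins not partitioned around value
-- (some element ≥ value occurring before an element < value): bins are documented sorted, and on
-- such inputs A's left-to-right first-crossing index is an artefact of scan order that no binary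
-- search can share.
def Pre_get_interval (bins : List Int) (value : Int) : Prop :=
  bins ≠ [] ∧ bins.Pairwise (fun a b => value ≤ a → value ≤ b)
instance (bins : List Int) (value : Int) : Decidable (Pre_get_interval bins value) := by
  unfold Pre_get_interval; infer_instance

def pvWitness_get_interval : List Int × Int := ([1, 3, 3, 7], 3)

def Spec_get_interval (bins : List Int) (value : Int) (out : Int) : Prop := out = get_interval_alt bins value
instance (bins : List Int) (value : Int) (out : Int) : Decidable (Spec_get_interval bins value out) := by unfold Spec_get_interval; infer_instance

-- ===== CLAIM (what is proved, stated in full; the proofs are below) =====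
def Claim_equal_get_interval : Prop := ∀ (bins : List Int) (value : Int), Dom_get_interval bins value → Pre_get_interval bins value → Spec_get_interval bins value (get_interval bins value)

-- ===== LEMMAS AND PROOFS =====

-- the common value both programs compute on sorted bins: the number of bins strictly below value
def lowerCount (bins : List Int) (value : Int) : Nat :=
  (bins.takeWhile (fun b => decide (b < value))).length

theorem lowerCount_le (bins : List Int) (value : Int) :
    lowerCount bins value ≤ bins.length := by
  unfold lowerCount
  exact (List.takeWhile_sublist _).length_le

-- characterisation on sorted bins: bins[i] < value ↔ i < lowerCount
theorem lt_iff_lt_lowerCount (bins : List Int) (value : Int)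
    (hs : bins.Pairwise (fun a b => value ≤ a → value ≤ b)) (i : Nat) (hi : i < bins.length) :
    (bins[i] < value ↔ i < lowerCount bins value) := by
  induction bins generalizing i with
  | nil => simp at hi
  | cons b rest ih =>
    rcases List.pairwise_cons.mp hs with ⟨hb, hrest⟩
    unfold lowerCount
    by_cases h : b < value
    · simp only [List.takeWhile_cons, h, decide_true]
      cases i with
      | zero => simpa using h
      | succ j =>
        have hj : j < rest.length := by simpa using hi
        have := ih hrest j hj
        unfold lowerCount at this
        simpa [Nat.succ_lt_succ_iff] using this
    · simp only [List.takeWhile_cons, h, decide_false, Bool.false_eq_true, if_false,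
        List.length_nil]
      cases i with
      | zero => simpa using h
      | succ j =>
        have hj : j < rest.length := by simpa using hi
        have hbv : value ≤ b := not_lt.mp h
        have : value ≤ rest[j] := hb _ (List.getElem_mem hj) hbv
        simp only [List.getElem_cons_succ]
        constructor
        · intro hlt; omega
        · intro hlt; omega

theorem pyGet?_getD_of_lt (bins : List Int) (i : Nat) (hi : i < bins.length) :
    (PySem.List.pyGet? bins (i : Int)).getD 0 = bins[i] := by
  rw [PySem.List.pyGet?_natCast]
  simp [List.getElem?_eq_getElem hi]

-- binary-search loop invariant
theorem bs_correct (bins : List Int) (value : Int) (hs : bins.Pairwise (fun a b => value ≤ a → value ≤ b)) :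
    ∀ (fuel : Nat) (lo hi : Int), 0 ≤ lo → lo ≤ (lowerCount bins value : Int) →
      (lowerCount bins value : Int) ≤ hi → hi ≤ (bins.length : Int) →
      hi - lo ≤ (fuel : Int) →
      get_interval_bs bins value fuel lo hi = (lowerCount bins value : Int) := by
  intro fuel
  induction fuel with
  | zero =>
    intro lo hi h0 hlo hhi hlen hfuel
    simp only [get_interval_bs]
    omega
  | succ f ih =>
    intro lo hi h0 hlo hhi hlen hfuel
    simp only [get_interval_bs]
    by_cases hlh : lo < hi
    · simp only [hlh, if_true]
      have hmid := PySem.Int.floordiv_two_mid_bounds (le_of_lt hlh)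
      set mid := PySem.Int.floordiv (lo + hi) 2 with hmiddef
      have hmlt : mid < hi := by
        rcases hmid with ⟨h1, h2⟩
        rcases lt_or_eq_of_le h2 with h | h
        · exact h
        · exfalso
          have : PySem.Int.floordiv (lo + hi) 2 = (lo + hi) / 2 :=
            PySem.Int.floordiv_eq_ediv_of_pos (by omega)
          omega
      have hmn : mid = ((mid.toNat : Nat) : Int) := by omega
      have hmltn : mid.toNat < bins.length := by omega
      have hget : (PySem.List.pyGet? bins mid).getD 0 = bins[mid.toNat] := by
        conv_lhs => rw [hmn]
        exact pyGet?_getD_of_lt bins mid.toNat hmltn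
      rw [hget]
      have hchar := lt_iff_lt_lowerCount bins value hs mid.toNat hmltn
      by_cases hc : bins[mid.toNat] < value
      · simp only [hc, if_true]
        have : mid.toNat < lowerCount bins value := hchar.mp hc
        exact ih (mid + 1) hi (by omega) (by omega) hhi hlen (by omega)
      · simp only [hc, if_false]
        have : ¬ mid.toNat < lowerCount bins value := fun h => hc (hchar.mpr h)
        exact ih lo mid h0 hlo (by omega) (by omega) (by omega)
    · simp only [hlh, if_false]
      omega

theorem alt_eq_lowerCount (bins : List Int) (value : Int) (hs : bins.Pairwise (fun a b => value ≤ a → value ≤ b)) :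
    get_interval_alt bins value = (lowerCount bins value : Nat) := by
  unfold get_interval_alt
  have h := lowerCount_le bins value
  exact bs_correct bins value hs (bins.length + 1) 0 (bins.length : Int)
    le_rfl (by exact_mod_cast Nat.zero_le _) (by exact_mod_cast h) le_rfl (by push_cast; omega)

-- the scan loop finds lowerCount when it lies strictly inside [1, len)
theorem scan_correct (bins : List Int) (value : Int) (hs : bins.Pairwise (fun a b => value ≤ a → value ≤ b)) :
    ∀ (n i : Nat), bins.length - i ≤ n → 1 ≤ i → i ≤ lowerCount bins value → lowerCount bins value < bins.length →
      get_interval_scan bins value (PySem.List.pyRange (i : Int) (bins.length : Int) 1) =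
        (lowerCount bins value : Int) := by
  intro n
  induction n with
  | zero =>
    intro i hn h1 hle hlt
    omega
  | succ n ih =>
    intro i hn h1 hle hlt
    have hilt : (i : Int) < (bins.length : Int) := by omega
    rw [PySem.List.pyRange_one_cons hilt]
    simp only [get_interval_scan]
    have hi1 : ((i : Int) - 1) = ((i - 1 : Nat) : Int) := by omega
    have hlen1 : i - 1 < bins.length := by omega
    have hleni : i < bins.length := by omega
    rw [hi1, pyGet?_getD_of_lt bins (i - 1) hlen1, pyGet?_getD_of_lt bins i hleni]
    have hc1 := lt_iff_lt_lowerCount bins value hs (i - 1) hlen1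
    have hc2 := lt_iff_lt_lowerCount bins value hs i hleni
    by_cases heq : i = lowerCount bins value
    · have : bins[i - 1] < value := hc1.mpr (by omega)
      have h2 : ¬ bins[i] < value := fun h => by have := hc2.mp h; omega
      rw [if_pos ⟨this, not_lt.mp h2⟩, heq]
    · have h2 : bins[i] < value := hc2.mpr (by omega)
      have hnot : ¬ (bins[i - 1] < value ∧ value ≤ bins[i]) := by
        intro ⟨_, hv⟩; omega
      rw [if_neg hnot]
      have hstep : i < lowerCount bins value := lt_of_le_of_ne hle heq
      rw [show ((i : Int) + 1) = (((i + 1 : Nat) : Int)) from by omega]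
      exact ih (i + 1) (by omega) (by omega) (by omega) hlt

-- ===== VERDICT (by name: the statement is the Claim_ definition above) =====
theorem get_interval_spec : Claim_equal_get_interval := by
  intro bins value _ hpre
  rcases hpre with ⟨hne, hs⟩
  unfold Spec_get_interval
  rw [alt_eq_lowerCount bins value hs]
  have hlen : 0 < bins.length := List.length_pos_iff.mpr hne
  unfold get_interval
  have h0 : (PySem.List.pyGet? bins 0).getD 0 = bins[0] := by
    have := pyGet?_getD_of_lt bins 0 hlen
    simpa using this
  have hlast : (PySem.List.pyGet? bins (-1)).getD 0 = bins[bins.length - 1] := by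
    rw [PySem.List.pyGet?_neg_one, List.getLast?_eq_getElem?]
    have hlt : bins.length - 1 < bins.length := by omega
    simp [List.getElem?_eq_getElem hlt]
  rw [h0, hlast]
  have hchar0 := lt_iff_lt_lowerCount bins value hs 0 hlen
  have hcharL := lt_iff_lt_lowerCount bins value hs (bins.length - 1) (by omega)
  have hcle := lowerCount_le bins value
  by_cases hv0 : value ≤ bins[0]
  · rw [if_pos hv0]
    have : ¬ 0 < lowerCount bins value := fun h => by
      have := hchar0.mpr h; omega
    omega
  · rw [if_neg hv0]
    have hgt0 : 0 < lowerCount bins value := hchar0.mp (by omega)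
    by_cases hvl : bins[bins.length - 1] < value
    · rw [if_pos hvl]
      have := hcharL.mp hvl
      have : lowerCount bins value = bins.length := by omega
      rw [this]
    · rw [if_neg hvl]
      have hlt : lowerCount bins value < bins.length := by
        have : ¬ (bins.length - 1 < lowerCount bins value) := fun h => hvl (hcharL.mpr h)
        omega
      exact scan_correct bins value hs bins.length 1 (by omega) le_rfl (by omega) hlt
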